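-- pv_equiv track=rewrite | github.com/dbountouridis/InCredible | gaOnSentences.py | seriesSentence
-- ===== SOURCE A (Python) =====
-- def seriesSentence(sentences,individual):
-- 	s=sentences[:]
-- 	v=individual[:]
-- 	ns=[]
-- 	t=s[0]
-- 	for i in range(len(v)):
-- 		if v[i]==0:
-- 			ns.append(t)
-- 			t=s[i+1]
-- 		else:
-- 			t+=" "+s[i+1]
-- 	ns.append(t)
-- 	return ns
-- ===== SOURCE B (Python) =====
-- def seriesSentence(sentences, individual):
--     n = len(individual)
--     # first n+1 sentences by index (IndexError if fewer, as a direct indexing would give)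
--     prefix = [sentences[i] for i in range(n + 1)]
--     # split boundaries: position i+1 starts a new group whenever individual[i] == 0
--     bounds = [i + 1 for i, x in enumerate(individual) if x == 0]
--     chunks = []
--     prev = 0
--     for b in bounds:
--         chunks.append(prefix[prev:b])
--         prev = b
--     chunks.append(prefix[prev:])
--     return [" ".join(c) for c in chunks]
-- ===== Notes on version B (the rewrite author's own statement) =====
-- stated objective: alternative
-- what changed: B replaces A's running string-accumulator loop by a boundary-index computation: it takes the first len(individual)+1 sentences by index, collects the split positions i+1 where individual[i]==0, slices that prefix into chunks at those boundaries, and joins each chunk with spaces.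
import Mathlib
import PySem

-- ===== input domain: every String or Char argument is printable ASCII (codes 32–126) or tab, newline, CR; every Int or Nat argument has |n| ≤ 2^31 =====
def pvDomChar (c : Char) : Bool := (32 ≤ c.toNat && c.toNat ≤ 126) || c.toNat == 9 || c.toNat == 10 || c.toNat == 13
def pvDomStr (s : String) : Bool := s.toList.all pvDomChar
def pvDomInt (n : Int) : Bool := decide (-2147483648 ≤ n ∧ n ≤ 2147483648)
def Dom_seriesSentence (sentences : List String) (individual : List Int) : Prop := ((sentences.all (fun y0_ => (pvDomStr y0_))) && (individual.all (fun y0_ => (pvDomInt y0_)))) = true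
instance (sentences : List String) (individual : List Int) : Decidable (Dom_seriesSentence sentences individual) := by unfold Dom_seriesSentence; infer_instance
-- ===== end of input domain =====

-- B re-decomposes A's accumulator loop as: take the first len(individual)+1 sentences by index,
-- collect split-boundary indices, slice that prefix into chunks, and join each chunk
-- ("alternative" decomposition, same cost).

-- ===== PORT A =====
-- literal transliteration of A: t = s[0]; for i in range(len(v)): append/extend; append(t)
-- (s[i] ported with pyGetD; Pre_ guarantees every access is in range, where Python would not raise)
def seriesSentence (sentences : List String) (individual : List Int) : List String :=
  let s := sentences
  let v := individual
  let t := PySem.List.pyGetD s 0 ""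
  let r := (PySem.List.pyRange 0 (v.length : Int) 1).foldl
    (fun (st : List String × String) i =>
      if PySem.List.pyGetD v i 0 == 0 then
        (st.1 ++ [st.2], PySem.List.pyGetD s (i + 1) "")
      else
        (st.1, st.2 ++ " " ++ PySem.List.pyGetD s (i + 1) "")) ([], t)
  r.1 ++ [r.2]

-- ===== PORT B =====
-- literal transliteration of Source B: indexed prefix, boundary list, slice chunks, join each chunk
-- (sentences[i] ported with pyGetD; Pre_ guarantees every access is in range, where Python would not raise)
def seriesSentence_alt (sentences : List String) (individual : List Int) : List String :=
  let n := (individual.length : Int)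
  let prefx := (PySem.List.pyRange 0 (n + 1) 1).map (fun i => PySem.List.pyGetD sentences i "")
  let bounds := ((PySem.List.enumerate individual).filter (fun p => p.2 == 0)).map (fun p => p.1 + 1)
  let r := bounds.foldl
    (fun (st : List (List String) × Int) b =>
      (st.1 ++ [PySem.List.slice prefx (some st.2) (some b)], b)) ([], 0)
  let chunks := r.1 ++ [PySem.List.slice prefx (some r.2) none]
  chunks.map (fun c => PySem.Str.join " " c)

-- ===== PRECONDITION & SPEC =====
-- Both A and B raise IndexError (indexing past the end of sentences) unless
-- len(sentences) ≥ len(individual)+1; Pre_ excludes exactly those raising inputs.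
def Pre_seriesSentence (sentences : List String) (individual : List Int) : Prop :=
  individual.length + 1 ≤ sentences.length
instance (sentences : List String) (individual : List Int) : Decidable (Pre_seriesSentence sentences individual) := by unfold Pre_seriesSentence; infer_instance
def pvWitness_seriesSentence : List String × List Int := (["a", "b"], [0])

def Spec_seriesSentence (sentences : List String) (individual : List Int) (out : List String) : Prop := out = seriesSentence_alt sentences individual
instance (sentences : List String) (individual : List Int) (out : List String) : Decidable (Spec_seriesSentence sentences individual out) := by unfold Spec_seriesSentence; infer_instance

-- ===== CLAIM (what is proved, stated in full; the proofs are below) =====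
def Claim_equal_seriesSentence : Prop := ∀ (sentences : List String) (individual : List Int), Dom_seriesSentence sentences individual → Pre_seriesSentence sentences individual → Spec_seriesSentence sentences individual (seriesSentence sentences individual)

-- ===== LEMMAS AND PROOFS =====

-- reference form of A's loop state
def pvRefLoop : List String → String → List Int → List String → List String × String
  | ns, t, [], _ => (ns, t)
  | ns, t, x :: v', s' =>
    if x == 0 then pvRefLoop (ns ++ [t]) (s'.getD 0 "") v' s'.tail
    else pvRefLoop ns (t ++ " " ++ s'.getD 0 "") v' s'.tail

-- grouping as one string accumulator (A's shape)
def pvGrp : String → List Int → List String → List String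
  | t, [], _ => [t]
  | t, x :: v', s' =>
    if x == 0 then t :: pvGrp (s'.getD 0 "") v' s'.tail
    else pvGrp (t ++ " " ++ s'.getD 0 "") v' s'.tail

-- grouping as word chunks (B's shape)
def pvSgrp : List String → List Int → List String → List (List String)
  | acc, [], _ => [acc]
  | acc, x :: v', s' =>
    if x == 0 then acc :: pvSgrp [s'.getD 0 ""] v' s'.tail
    else pvSgrp (acc ++ [s'.getD 0 ""]) v' s'.tail

theorem pvJoin_singleton (w : String) : PySem.Str.join " " [w] = w := by
  simp [PySem.Str.join, PySem.Chars.join_singleton]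

theorem pvJoin_cons_cons (p q : String) (r : List String) :
    PySem.Str.join " " (p :: q :: r) = p ++ " " ++ PySem.Str.join " " (q :: r) := by
  simp [PySem.Str.join, PySem.Chars.join_cons_cons]
  rw [show (' ' :: PySem.Chars.join [' '] (q.toList :: List.map String.toList r))
        = [' '] ++ PySem.Chars.join [' '] (q.toList :: List.map String.toList r) from rfl,
      String.ofList_append]
  rw [show String.ofList [' '] = " " by decide, ← String.append_assoc]

theorem pvJoin_append_singleton (acc : List String) (w : String) (h : acc ≠ []) :
    PySem.Str.join " " (acc ++ [w]) = PySem.Str.join " " acc ++ " " ++ w := by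
  induction acc with
  | nil => exact absurd rfl h
  | cons a rest ih =>
    cases rest with
    | nil => rw [List.cons_append, List.nil_append, pvJoin_cons_cons, pvJoin_singleton, pvJoin_singleton]
    | cons b r =>
      simp only [List.cons_append]
      rw [pvJoin_cons_cons]
      simp only [List.cons_append] at ih
      rw [ih (by simp), pvJoin_cons_cons]
      simp [String.append_assoc]

theorem pvLoopA (s : List String) (v : List Int) :
    ∀ (n a : Nat) (ns : List String) (t : String), a + n = v.length →
      ((PySem.List.pyRange (a : Int) (v.length : Int) 1).foldl
        (fun (st : List String × String) i =>
          if PySem.List.pyGetD v i 0 == 0 then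
            (st.1 ++ [st.2], PySem.List.pyGetD s (i + 1) "")
          else
            (st.1, st.2 ++ " " ++ PySem.List.pyGetD s (i + 1) "")) (ns, t))
      = pvRefLoop ns t (v.drop a) (s.drop (a + 1)) := by
  intro n
  induction n with
  | zero =>
    intro a ns t ha
    rw [PySem.List.pyRange_one_eq_nil (by exact_mod_cast Nat.le_of_eq (by omega)),
        List.drop_eq_nil_of_le (by omega)]
    rfl
  | succ n ih =>
    intro a ns t ha
    have hlt : a < v.length := by omega
    rw [PySem.List.pyRange_one_cons (by exact_mod_cast hlt)]
    have hca : ((a : Int) + 1) = (((a + 1 : Nat)) : Int) := by push_cast; ring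
    have hv : PySem.List.pyGetD v (a : Int) 0 = v[a] := by
      rw [PySem.List.pyGetD_natCast]
      exact List.getD_eq_getElem v 0 hlt
    have hs : PySem.List.pyGetD s (((a + 1 : Nat)) : Int) "" = (s.drop (a + 1)).getD 0 "" := by
      rw [PySem.List.pyGetD_natCast]
      simp [List.getD_eq_getElem?_getD, List.getElem?_drop]
    simp only [List.foldl_cons, hca, hv, hs]
    rw [List.drop_eq_getElem_cons hlt]
    simp only [pvRefLoop]
    by_cases h0 : v[a] = 0
    · rw [if_pos (by simp [h0]), if_pos (by simp [h0]), List.tail_drop, ih (a + 1) _ _ (by omega)]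
    · rw [if_neg (by simp [h0]), if_neg (by simp [h0]), List.tail_drop, ih (a + 1) _ _ (by omega)]

theorem pvRefLoop_grp : ∀ (v' : List Int) (ns : List String) (t : String) (s' : List String),
    (pvRefLoop ns t v' s').1 ++ [(pvRefLoop ns t v' s').2] = ns ++ pvGrp t v' s' := by
  intro v'
  induction v' with
  | nil => intro ns t s'; rfl
  | cons x v'' ih =>
    intro ns t s'
    simp only [pvRefLoop, pvGrp]
    by_cases h0 : x = 0
    · simp only [h0, beq_self_eq_true, if_true, ih]
      simp
    · simp only [beq_iff_eq, h0, if_false, ih]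

theorem pvA_grp (s : List String) (v : List Int) :
    seriesSentence s v = pvGrp (s.getD 0 "") v (s.drop 1) := by
  have hL := pvLoopA s v v.length 0 [] (PySem.List.pyGetD s 0 "") (by omega)
  simp only [Nat.cast_zero] at hL
  simp only [seriesSentence]
  rw [hL]
  simp [pvRefLoop_grp, PySem.List.pyGetD_zero]

theorem pvLoopB (p : List String) (N : Nat) (hp : p.length = N + 1) :
    ∀ (v' : List Int) (a prev : Nat) (chunks : List (List String)),
      prev ≤ a + 1 → a + v'.length = N →
      ((((PySem.List.enumerate v' (a : Int)).filter (fun q => q.2 == 0)).map (fun q => q.1 + 1)).foldl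
        (fun (st : List (List String) × Int) b =>
          (st.1 ++ [PySem.List.slice p (some st.2) (some b)], b)) (chunks, (prev : Int))).1
      ++ [PySem.List.slice p (some (((((PySem.List.enumerate v' (a : Int)).filter (fun q => q.2 == 0)).map (fun q => q.1 + 1)).foldl
        (fun (st : List (List String) × Int) b =>
          (st.1 ++ [PySem.List.slice p (some st.2) (some b)], b)) (chunks, (prev : Int))).2)) none]
      = chunks ++ pvSgrp (PySem.List.slice p (some (prev : Int)) (some ((a : Int) + 1))) v' (p.drop (a + 1)) := by
  intro v'
  induction v' with
  | nil =>
    intro a prev chunks hprev hlen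
    have hN : a = N := by simpa using hlen
    simp only [PySem.List.enumerate_nil, List.filter_nil, List.map_nil, List.foldl_nil, pvSgrp]
    have hca : ((a : Int) + 1) = (((a + 1 : Nat)) : Int) := by push_cast; ring
    rw [PySem.List.slice_from_natCast, hca, PySem.List.slice_natCast,
        List.take_of_length_le (by simp only [List.length_drop]; omega)]
  | cons x v'' ih =>
    intro a prev chunks hprev hlen
    simp only [List.length_cons] at hlen
    have haP : a + 1 < p.length := by omega
    have hca : ((a : Int) + 1) = (((a + 1 : Nat)) : Int) := by push_cast; ring
    have hsingle : PySem.List.slice p (some (((a + 1 : Nat)) : Int)) (some ((((a + 1 : Nat)) : Int) + 1))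
        = [(p.drop (a + 1)).getD 0 ""] := by
      rw [show ((((a + 1 : Nat)) : Int) + 1) = (((a + 2 : Nat)) : Int) by push_cast; ring,
          PySem.List.slice_natCast]
      have h21 : a + 2 - (a + 1) = 1 := by omega
      rw [h21, List.drop_eq_getElem_cons haP, List.take_succ_cons, List.take_zero, List.getD_cons_zero]
    by_cases h0 : x = 0
    · have hstep : ((PySem.List.enumerate (x :: v'') (a : Int)).filter (fun q => q.2 == 0)).map (fun q => q.1 + 1)
          = ((a : Int) + 1) :: ((PySem.List.enumerate v'' ((a : Int) + 1)).filter (fun q => q.2 == 0)).map (fun q => q.1 + 1) := by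
        rw [PySem.List.enumerate_cons]
        simp [h0]
      rw [hstep, hca]
      simp only [List.foldl_cons]
      rw [ih (a + 1) (a + 1) (chunks ++ [PySem.List.slice p (some (prev : Int)) (some (((a + 1 : Nat)) : Int))]) (by omega) (by omega)]
      simp only [pvSgrp]
      rw [if_pos (by simp [h0]), hsingle, List.tail_drop]
      simp [List.append_assoc]
    · have hstep : ((PySem.List.enumerate (x :: v'') (a : Int)).filter (fun q => q.2 == 0)).map (fun q => q.1 + 1)
          = ((PySem.List.enumerate v'' ((a : Int) + 1)).filter (fun q => q.2 == 0)).map (fun q => q.1 + 1) := by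
        rw [PySem.List.enumerate_cons]
        simp [h0]
      rw [hstep, hca]
      rw [ih (a + 1) prev chunks (by omega) (by omega)]
      simp only [pvSgrp]
      rw [if_neg (by simp [h0])]
      have hext : PySem.List.slice p (some (prev : Int)) (some ((((a + 1 : Nat)) : Int) + 1))
          = PySem.List.slice p (some (prev : Int)) (some (((a + 1 : Nat)) : Int)) ++ [(p.drop (a + 1)).getD 0 ""] := by
        rw [show ((((a + 1 : Nat)) : Int) + 1) = (((a + 2 : Nat)) : Int) by push_cast; ring,
            PySem.List.slice_natCast, PySem.List.slice_natCast]
        have h1 : a + 2 - prev = (a + 1 - prev) + 1 := by omega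
        rw [h1, List.take_add_one]
        have h2 : (List.drop prev p)[a + 1 - prev]? = some (p[a + 1]) := by
          rw [List.getElem?_drop, show prev + (a + 1 - prev) = a + 1 by omega]
          exact List.getElem?_eq_getElem haP
        rw [h2, List.drop_eq_getElem_cons haP, List.getD_cons_zero]
        rfl
      rw [hext, List.tail_drop]

theorem pvSgrp_take : ∀ (v' : List Int) (acc : List String) (s' : List String),
    pvSgrp acc v' (s'.take v'.length) = pvSgrp acc v' s' := by
  intro v'
  induction v' with
  | nil => intro acc s'; rfl
  | cons x v'' ih =>
    intro acc s'
    cases s' with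
    | nil => rfl
    | cons h t =>
      simp only [List.length_cons, List.take_succ_cons, pvSgrp, List.getD_cons_zero, List.tail_cons]
      by_cases h0 : x = 0
      · simp only [h0, beq_self_eq_true, if_true, ih]
      · simp only [beq_iff_eq, h0, if_false, ih]

theorem pvGrp_sgrp : ∀ (v' : List Int) (acc : List String) (s' : List String), acc ≠ [] →
    pvGrp (PySem.Str.join " " acc) v' s' = (pvSgrp acc v' s').map (PySem.Str.join " ") := by
  intro v'
  induction v' with
  | nil => intro acc s' h; rfl
  | cons x v'' ih =>
    intro acc s' h
    simp only [pvGrp, pvSgrp]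
    by_cases h0 : x = 0
    · simp only [h0, beq_self_eq_true, if_true, List.map_cons]
      rw [← pvJoin_singleton (s'.getD 0 ""), ih [s'.getD 0 ""] s'.tail (by simp),
          pvJoin_singleton]
    · simp only [beq_iff_eq, h0, if_false]
      rw [← pvJoin_append_singleton acc (s'.getD 0 "") h, ih (acc ++ [s'.getD 0 ""]) s'.tail (by simp)]

-- B's indexed prefix equals the first (len v + 1) sentences when they all exist
theorem pvPrefix_eq (s : List String) (n : Nat) (h : n + 1 ≤ s.length) :
    (PySem.List.pyRange 0 ((n : Int) + 1) 1).map (fun i => PySem.List.pyGetD s i "")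
      = s.take (n + 1) := by
  rw [show ((n : Int) + 1) = (((n + 1 : Nat)) : Int) by push_cast; ring]
  apply List.ext_getElem
  · simp [PySem.List.length_pyRange_one, List.length_take]
    omega
  · intro k h1 h2
    simp only [List.getElem_map, PySem.List.getElem_pyRange_one, zero_add]
    have hk : k < n + 1 := by
      simpa [PySem.List.length_pyRange_one] using h1
    rw [PySem.List.pyGetD_natCast, List.getElem_take]
    exact List.getD_eq_getElem s "" (by omega)

theorem pvB_sgrp (s : List String) (v : List Int) (hPre : v.length + 1 ≤ s.length) :
    seriesSentence_alt s v = (pvSgrp [s.getD 0 ""] v (s.drop 1)).map (PySem.Str.join " ") := by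
  obtain ⟨s0, t, rfl⟩ : ∃ s0 t, s = s0 :: t := by
    cases s with
    | nil => simp at hPre
    | cons a b => exact ⟨a, b, rfl⟩
  have ht : v.length ≤ t.length := by simp at hPre; omega
  simp only [seriesSentence_alt]
  have hpfx : (PySem.List.pyRange 0 ((v.length : Int) + 1) 1).map
        (fun i => PySem.List.pyGetD (s0 :: t) i "")
      = s0 :: t.take v.length := by
    rw [pvPrefix_eq (s0 :: t) v.length (by simp; omega), List.take_succ_cons]
  rw [hpfx]
  have hlp : (s0 :: t.take v.length).length = v.length + 1 := by
    simp [List.length_take]; omega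
  have hL := pvLoopB (s0 :: t.take v.length) v.length hlp v 0 0 [] (by omega) (by omega)
  simp only [Nat.cast_zero] at hL
  rw [hL]
  have h01 : PySem.List.slice (s0 :: t.take v.length) (some 0) (some ((0 : Int) + 1)) = [s0] := by
    rw [show ((0 : Int) + 1) = (((1 : Nat)) : Int) by norm_num]
    rw [PySem.List.slice_zero_start, PySem.List.slice_to_natCast]
    rfl
  rw [h01]
  simp only [List.nil_append, List.drop_succ_cons, List.drop_zero, List.getD_cons_zero]
  rw [pvSgrp_take]

-- ===== VERDICT (by name: the statement is the Claim_ definition above) =====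
theorem seriesSentence_spec : Claim_equal_seriesSentence := by
  intro s v _hDom hPre
  unfold Spec_seriesSentence
  rw [pvA_grp, pvB_sgrp s v hPre]
  have h := pvGrp_sgrp v [s.getD 0 ""] (s.drop 1) (by simp)
  rw [pvJoin_singleton] at h
  exact h
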